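-- pv_equiv track=rewrite | github.com/williamzchan/Python-Series | Image_editor.py | fold_diag
-- ===== SOURCE A (Python) =====
-- def create_uniform_image(height, width, pixel):
--     """ creates and returns a 2-D list of pixels with height rows and
--         width columns in which all of the pixels have the RGB values
--         given by pixel
--         inputs: height and width are non-negative integers
--                 pixel is a 1-D list of RBG values of the form [R,G,B],
--                      where each element is an integer between 0 and 255.
--     """
--     pixels = []
--
--     for r in range(height):
--         row = [pixel] * width
--         pixels += [row]
--
--     return pixels
--
-- def fold_diag(pixels):
--     """ takes given image and folds is diagonally """
--
--     height = len(pixels)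
--     width = len(pixels[0])
--     white = [255, 255, 255]
--     new_pixels = create_uniform_image(height, width,  [0, 255, 0] )
--     white = [255, 255, 255]
--
--     for r in range(height):
--         for c in range(width):
--             if  [r] > [c]:
--
--                 new_pixels[r] [c] = white
--             elif [r] <= [c]:
--
--                 new_pixels[r] [c] = pixels [r] [c]
--
--     return new_pixels
-- ===== SOURCE B (Python) =====
-- def fold_diag(pixels):
--     """ takes given image and folds is diagonally """
--     height = len(pixels)
--     width = len(pixels[0])
--     white = [255, 255, 255]
--     new_pixels = []
--     for r in range(height):
--         row = [white] * min(r, width)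
--         row += [pixels[r][c] for c in range(r, width)]
--         new_pixels.append(row)
--     return new_pixels
-- ===== Notes on version B (the rewrite author's own statement) =====
-- stated objective: simpler
-- what changed: B builds each output row directly as a white prefix of length min(r,width) plus the original pixels from column r on, in one row loop, instead of A's green scratch image with a per-cell compare-and-assign over every (r,c).
import Mathlib
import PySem

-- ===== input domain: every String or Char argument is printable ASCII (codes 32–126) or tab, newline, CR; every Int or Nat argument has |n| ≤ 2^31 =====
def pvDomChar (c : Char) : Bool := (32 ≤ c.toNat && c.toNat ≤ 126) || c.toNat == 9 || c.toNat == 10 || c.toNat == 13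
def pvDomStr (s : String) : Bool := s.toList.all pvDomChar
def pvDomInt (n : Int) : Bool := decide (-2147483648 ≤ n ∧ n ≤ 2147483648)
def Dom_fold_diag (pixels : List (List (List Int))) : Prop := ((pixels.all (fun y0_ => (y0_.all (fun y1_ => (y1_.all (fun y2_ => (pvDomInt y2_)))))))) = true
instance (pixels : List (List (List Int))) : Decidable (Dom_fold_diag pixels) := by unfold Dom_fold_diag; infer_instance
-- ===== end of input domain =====

-- B builds each row directly as a white prefix plus the surviving pixel suffix, skipping A's
-- green scratch image and its per-cell test-and-assign pass (simpler: one constructive row loop).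


-- ===== PORT A =====
def create_uniform_image (height width : Int) (pixel : List Int) : List (List (List Int)) :=
  (PySem.List.pyRange 0 height 1).foldl
    (fun pixels _r => pixels ++ [PySem.List.pyRepeat [pixel] width]) []

-- pixels[0] and pixels[r][c] raise IndexError in Python on empty / too-short lists;
-- those inputs are excluded by Pre_fold_diag, so the pyGetD defaults are never reached there.
-- '[r] > [c]' / '[r] <= [c]' compare singleton lists lexicographically, i.e. r > c / r ≤ c.
def fold_diag (pixels : List (List (List Int))) : List (List (List Int)) :=
  let height : Int := pixels.length
  let width : Int := (PySem.List.pyGetD pixels 0 []).length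
  let white : List Int := [255, 255, 255]
  let new_pixels := create_uniform_image height width [0, 255, 0]
  (PySem.List.pyRange 0 height 1).foldl (fun np r =>
    (PySem.List.pyRange 0 width 1).foldl (fun np c =>
      if r > c then
        PySem.List.pySetD np r (PySem.List.pySetD (PySem.List.pyGetD np r []) c white)
      else if r ≤ c then
        PySem.List.pySetD np r (PySem.List.pySetD (PySem.List.pyGetD np r []) c
          (PySem.List.pyGetD (PySem.List.pyGetD pixels r []) c []))
      else np) np) new_pixels

-- ===== PORT B =====
def fold_diag_alt (pixels : List (List (List Int))) : List (List (List Int)) :=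
  let height : Int := pixels.length
  let width : Int := (PySem.List.pyGetD pixels 0 []).length
  let white : List Int := [255, 255, 255]
  (PySem.List.pyRange 0 height 1).foldl (fun nps r =>
    nps ++ [PySem.List.pyRepeat [white] (min r width) ++
      (PySem.List.pyRange r width 1).map (fun c =>
        PySem.List.pyGetD (PySem.List.pyGetD pixels r []) c [])]) []

-- ===== PRECONDITION & SPEC =====
-- Exactly where Python A returns: pixels nonempty, and each of the first width rows has at
-- least width = len(pixels[0]) entries (rows r ≥ width are only written white, never read).
def Pre_fold_diag (pixels : List (List (List Int))) : Prop :=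
  pixels ≠ [] ∧
    ∀ row ∈ pixels.take (pixels.headD []).length, (pixels.headD []).length ≤ row.length
instance (pixels : List (List (List Int))) : Decidable (Pre_fold_diag pixels) := by
  unfold Pre_fold_diag; infer_instance
def pvWitness_fold_diag : List (List (List Int)) :=
  [[[1, 2, 3], [4, 5, 6]], [[7, 8, 9], [10, 11, 12]]]

def Spec_fold_diag (pixels : List (List (List Int))) (out : List (List (List Int))) : Prop := out = fold_diag_alt pixels
instance (pixels : List (List (List Int))) (out : List (List (List Int))) : Decidable (Spec_fold_diag pixels out) := by unfold Spec_fold_diag; infer_instance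

-- ===== CLAIM (what is proved, stated in full; the proofs are below) =====
def Claim_equal_fold_diag : Prop := ∀ (pixels : List (List (List Int))), Dom_fold_diag pixels → Pre_fold_diag pixels → Spec_fold_diag pixels (fold_diag pixels)

-- ===== LEMMAS AND PROOFS =====

-- reading next to an in-place write, Int index version
theorem pv_getD_setD {α : Type} (np : List α) (r : Int) (i : Nat) (v d : α)
    (h0 : 0 ≤ r) (h1 : r < (np.length : Int)) :
    PySem.List.pyGetD (PySem.List.pySetD np r v) i d
      = if (i : Int) = r then v else PySem.List.pyGetD np i d := by
  obtain ⟨n, rfl⟩ : ∃ n : Nat, r = (n : Int) := ⟨r.toNat, by omega⟩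
  rw [PySem.List.pyGetD_pySetD_natCast np n i v d (by omega)]
  by_cases h : i = n
  · simp [h]
  · have h2 : ¬ ((i : Int) = (n : Int)) := by omega
    simp [h, h2]

-- length is preserved by a fold of in-place element updates
theorem pv_foldSet_length {α : Type} (G : Int → α → α) (d : α) :
    ∀ (l : List Int) (np : List α),
      (l.foldl (fun np r => PySem.List.pySetD np r (G r (PySem.List.pyGetD np r d))) np).length
        = np.length := by
  intro l
  induction l with
  | nil => intro np; rfl
  | cons r l ih =>
      intro np
      simp only [List.foldl_cons]
      rw [ih, PySem.List.length_pySetD]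

-- a fold of in-place updates at distinct in-range indices, read elementwise
theorem pv_foldSet_getD {α : Type} (G : Int → α → α) (d : α) :
    ∀ (l : List Int) (np : List α) (i : Nat), l.Nodup →
      (∀ r ∈ l, 0 ≤ r ∧ r < (np.length : Int)) →
      PySem.List.pyGetD
        (l.foldl (fun np r => PySem.List.pySetD np r (G r (PySem.List.pyGetD np r d))) np) i d
        = if (i : Int) ∈ l then G i (PySem.List.pyGetD np i d) else PySem.List.pyGetD np i d := by
  intro l
  induction l with
  | nil => intro np i _ _; simp
  | cons r l ih =>
      intro np i hnd hb
      have hr := hb r (List.mem_cons_self)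
      simp only [List.foldl_cons]
      rw [ih (PySem.List.pySetD np r (G r (PySem.List.pyGetD np r d))) i
        (List.Nodup.of_cons hnd)
        (fun x hx => by
          have := hb x (List.mem_cons_of_mem _ hx)
          rwa [PySem.List.length_pySetD])]
      rw [pv_getD_setD np r i _ d hr.1 hr.2]
      by_cases hil : (i : Int) ∈ l
      · have hir : (i : Int) ≠ r := fun h => (List.nodup_cons.mp hnd).1 (h ▸ hil)
        simp [hil, hir]
      · by_cases hieq : (i : Int) = r
        · have hrl : r ∉ l := (List.nodup_cons.mp hnd).1
          simp [hieq, hrl]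
        · simp [hil, hieq]

-- setting every index of a w-length row turns it into the map over range(w)
theorem pv_row_fold (w : Nat) (v : Int → List Int) (row : List (List Int))
    (hlen : row.length = w) :
    (PySem.List.pyRange 0 (w : Int) 1).foldl
        (fun row c => PySem.List.pySetD row c (v c)) row
      = (PySem.List.pyRange 0 (w : Int) 1).map v := by
  have hlen2 : ((PySem.List.pyRange 0 (w : Int) 1).foldl
      (fun row c => PySem.List.pySetD row c (v c)) row).length = w := by
    rw [pv_foldSet_length (fun c (_ : List Int) => v c) ([] : List Int)]; exact hlen
  apply List.ext_getElem
  · rw [hlen2, List.length_map, PySem.List.length_pyRange_one]; omega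
  · intro j h1 h2
    have hjw : j < w := by rwa [hlen2] at h1
    have hLHS : PySem.List.pyGetD ((PySem.List.pyRange 0 (w : Int) 1).foldl
        (fun row c => PySem.List.pySetD row c (v c)) row) j [] = v j := by
      rw [pv_foldSet_getD (fun c (_ : List Int) => v c) ([] : List Int) _ row j
        (PySem.List.nodup_pyRange_one 0 (w : Int))
        (fun r hr => by
          have := (PySem.List.mem_pyRange_one).mp hr
          constructor <;> omega)]
      have hm : (j : Int) ∈ PySem.List.pyRange 0 (w : Int) 1 := by
        rw [PySem.List.mem_pyRange_one]; omega
      simp [hm]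
    rw [PySem.List.pyGetD_eq_getElem _ _ (by omega) (by omega)] at hLHS
    simp only [Int.toNat_natCast] at hLHS
    rw [hLHS, List.getElem_map, PySem.List.getElem_pyRange_one]
    simp

-- B's row (white prefix ++ pixel suffix) IS the map over the full range
theorem pv_brow (w : Nat) (r : Int) (hr : 0 ≤ r) (pix : Int → List Int) :
    PySem.List.pyRepeat [([255, 255, 255] : List Int)] (min r (w : Int)) ++
        (PySem.List.pyRange r (w : Int) 1).map pix
      = (PySem.List.pyRange 0 (w : Int) 1).map
          (fun c => if r > c then ([255, 255, 255] : List Int) else pix c) := by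
  rw [PySem.List.pyRange_one_append 0 (min r (w : Int)) (w : Int) (by omega) (by omega),
    List.map_append]
  congr 1
  · rw [List.map_congr_left (g := fun _ => ([255, 255, 255] : List Int))
      (fun c hc => by
        have := (PySem.List.mem_pyRange_one).mp hc
        have h : r > c := by omega
        simp [h])]
    rw [List.map_const', PySem.List.pyRepeat_singleton, PySem.List.length_pyRange_one]
    congr 1; omega
  · by_cases hrw : r ≤ (w : Int)
    · have hm : min r (w : Int) = r := by omega
      rw [hm]
      refine List.map_congr_left (fun c hc => ?_)
      have := (PySem.List.mem_pyRange_one).mp hc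
      have h : ¬ r > c := by omega
      simp [h]
    · have h1 : PySem.List.pyRange r (w : Int) 1 = [] :=
        PySem.List.pyRange_one_eq_nil (by omega)
      have h2 : min r (w : Int) = (w : Int) := by omega
      rw [h1, h2, PySem.List.pyRange_one_eq_nil (by omega)]
      simp

-- A's outer loop, each step rewritten to an in-place row update (keeps the length invariant)
theorem pv_outer (pixels : List (List (List Int))) (w : Nat)
    (v : Int → Int → List Int)
    (hv : v = fun r c => if r > c then ([255, 255, 255] : List Int)
      else PySem.List.pyGetD (PySem.List.pyGetD pixels r []) c []) :
    ∀ (l : List Int) (np : List (List (List Int))),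
      (∀ r ∈ l, 0 ≤ r ∧ r < (np.length : Int)) →
      l.foldl (fun np r =>
        (PySem.List.pyRange 0 (w : Int) 1).foldl (fun np c =>
          if r > c then
            PySem.List.pySetD np r (PySem.List.pySetD (PySem.List.pyGetD np r []) c [255, 255, 255])
          else if r ≤ c then
            PySem.List.pySetD np r (PySem.List.pySetD (PySem.List.pyGetD np r []) c
              (PySem.List.pyGetD (PySem.List.pyGetD pixels r []) c []))
          else np) np) np
      = l.foldl (fun np r =>
          PySem.List.pySetD np r
            ((PySem.List.pyRange 0 (w : Int) 1).foldl
              (fun row c => PySem.List.pySetD row c (v r c))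
              (PySem.List.pyGetD np r []))) np := by
  intro l
  induction l with
  | nil => intro np _; rfl
  | cons r l ih =>
      intro np hb
      have hr := hb r (List.mem_cons_self)
      have hinner :
          (PySem.List.pyRange 0 (w : Int) 1).foldl (fun np c =>
            if r > c then
              PySem.List.pySetD np r (PySem.List.pySetD (PySem.List.pyGetD np r []) c [255, 255, 255])
            else if r ≤ c then
              PySem.List.pySetD np r (PySem.List.pySetD (PySem.List.pyGetD np r []) c
                (PySem.List.pyGetD (PySem.List.pyGetD pixels r []) c []))
            else np) np
          = (PySem.List.pyRange 0 (w : Int) 1).foldl (fun np c =>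
              PySem.List.pySetD np r (PySem.List.pySetD (PySem.List.pyGetD np r []) c (v r c))) np := by
        refine PySem.List.foldl_congr_mem _ _ _ _ (fun np' c _ => ?_)
        by_cases h : r > c
        · simp [h, hv]
        · have h2 : r ≤ c := by omega
          simp [h, h2, hv]
      have hmatrow : ∀ (np : List (List (List Int))), r < (np.length : Int) →
          (PySem.List.pyRange 0 (w : Int) 1).foldl (fun np c =>
              PySem.List.pySetD np r (PySem.List.pySetD (PySem.List.pyGetD np r []) c (v r c))) np
          = PySem.List.pySetD np r ((PySem.List.pyRange 0 (w : Int) 1).foldl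
              (fun row c => PySem.List.pySetD row c (v r c)) (PySem.List.pyGetD np r [])) := by
        induction (PySem.List.pyRange 0 (w : Int) 1) with
        | nil =>
            intro np hlt
            simp only [List.foldl_nil]
            rw [PySem.List.pySetD_of_nonneg _ _ hr.1,
              PySem.List.pyGetD_eq_getElem _ _ hr.1 hlt]
            exact (List.set_getElem_self ..).symm
        | cons c cl ihc =>
            intro np hlt
            simp only [List.foldl_cons]
            rw [ihc (PySem.List.pySetD np r (PySem.List.pySetD (PySem.List.pyGetD np r []) c (v r c)))
              (by rwa [PySem.List.length_pySetD])]
            obtain ⟨m, hm⟩ : ∃ m : Nat, r = (m : Int) := ⟨r.toNat, by omega⟩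
            subst hm
            rw [PySem.List.pyGetD_pySetD_natCast np m m _ [] (by omega)]
            simp [PySem.List.pySetD_natCast, List.set_set]
      simp only [List.foldl_cons]
      rw [hinner, hmatrow np hr.2]
      refine ih _ (fun x hx => ?_)
      have := hb x (List.mem_cons_of_mem _ hx)
      rwa [PySem.List.length_pySetD]

-- both ports equal the same map-of-maps normal form
theorem pv_normal (pixels : List (List (List Int))) :
    fold_diag pixels
      = (PySem.List.pyRange 0 (pixels.length : Int) 1).map (fun r =>
          (PySem.List.pyRange 0 ((PySem.List.pyGetD pixels 0 []).length : Int) 1).map (fun c =>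
            if r > c then ([255, 255, 255] : List Int)
            else PySem.List.pyGetD (PySem.List.pyGetD pixels r []) c [])) := by
  simp only [fold_diag, create_uniform_image]
  set n : Nat := pixels.length with hn
  set w : Nat := (PySem.List.pyGetD pixels 0 []).length with hw
  set v : Int → Int → List Int := fun r c =>
    if r > c then ([255, 255, 255] : List Int)
    else PySem.List.pyGetD (PySem.List.pyGetD pixels r []) c [] with hv
  rw [PySem.List.foldl_append_singleton_eq_map]
  set green := ([] : List (List (List Int))) ++ (PySem.List.pyRange 0 (n : Int) 1).map
      (fun _ => PySem.List.pyRepeat [([0, 255, 0] : List Int)] (w : Int)) with hgr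
  have hglen : green.length = n := by
    rw [hgr, List.nil_append, List.length_map, PySem.List.length_pyRange_one]; omega
  have hrowlen : ∀ i : Nat, i < n → (PySem.List.pyGetD green i []).length = w := by
    intro i hi
    rw [PySem.List.pyGetD_eq_getElem _ _ (by omega) (by omega : (i : Int) < green.length)]
    simp [hgr, PySem.List.pyRepeat_singleton]
  rw [pv_outer pixels w v hv _ green
    (fun r hr => by
      have := (PySem.List.mem_pyRange_one).mp hr
      constructor <;> omega)]
  apply List.ext_getElem
  · rw [pv_foldSet_length (fun r row => (PySem.List.pyRange 0 (w : Int) 1).foldl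
        (fun row c => PySem.List.pySetD row c (v r c)) row) ([] : List (List Int)), hglen, List.length_map, PySem.List.length_pyRange_one]; omega
  · intro i h1 h2
    have hin : i < n := by rwa [pv_foldSet_length (fun r row => (PySem.List.pyRange 0 (w : Int) 1).foldl
        (fun row c => PySem.List.pySetD row c (v r c)) row) ([] : List (List Int)), hglen] at h1
    have hmem : (i : Int) ∈ PySem.List.pyRange 0 (n : Int) 1 := by
      rw [PySem.List.mem_pyRange_one]; omega
    have hL : PySem.List.pyGetD ((PySem.List.pyRange 0 (n : Int) 1).foldl
        (fun np r => PySem.List.pySetD np r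
          ((PySem.List.pyRange 0 (w : Int) 1).foldl
            (fun row c => PySem.List.pySetD row c (v r c)) (PySem.List.pyGetD np r []))) green) i []
        = (PySem.List.pyRange 0 (w : Int) 1).foldl
            (fun row c => PySem.List.pySetD row c (v i c)) (PySem.List.pyGetD green i []) := by
      rw [pv_foldSet_getD (fun r row => (PySem.List.pyRange 0 (w : Int) 1).foldl
            (fun row c => PySem.List.pySetD row c (v r c)) row) ([] : List (List Int))
          _ green i (PySem.List.nodup_pyRange_one 0 (n : Int))
          (fun r hr => by
            have := (PySem.List.mem_pyRange_one).mp hr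
            constructor <;> omega)]
      simp [hmem]
    rw [pv_row_fold w (v i) _ (hrowlen i hin)] at hL
    rw [PySem.List.pyGetD_eq_getElem _ _ (by omega) (by omega : (i : Int) < _)] at hL
    simp only [Int.toNat_natCast] at hL
    rw [hL, List.getElem_map, PySem.List.getElem_pyRange_one]
    simp only [Int.zero_add, List.map_inj_left, PySem.List.mem_pyRange_one]
    intro a ha
    simp [hv, gt_iff_lt]

-- ===== VERDICT (by name: the statement is the Claim_ definition above) =====
theorem fold_diag_spec : Claim_equal_fold_diag := by
  intro pixels _ _
  unfold Spec_fold_diag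
  simp only [fold_diag_alt]
  rw [PySem.List.foldl_append_singleton_eq_map, List.nil_append, pv_normal]
  refine List.map_congr_left (fun r hr => ?_)
  have hr0 : 0 ≤ r := ((PySem.List.mem_pyRange_one).mp hr).1
  exact (pv_brow _ r hr0 _).symm
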